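-- pv_equiv track=rewrite | github.com/jfernandz/python-learning | Regex_Engine/testing/regex_stage5_uncommented.py | match_string
-- ===== SOURCE A (Python) =====
-- def match_char(single_re, character):
--     """Checks if a single character in a string does match
--     a single character in a regular expression (taking into
--     account also the wild-card '.' character)
--     """
--     if single_re in character:
--         return True
--     elif single_re == ".":
--         return True
--     else:
--         return False
--
-- def match_string(re, string):
--     """Checks if a regexp-string pair does match. Both of them must
--     have the same length!!. i.e. It compares the 're' pattern with
--     a given 'string' character by character using match_char()
--     function.
--     """
--     if len(re) == 0:
--         return True
--     elif len(string) == 0: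
--         if re == "$":
--             return True
--         return False
--
--     if len(re) > 1 and re[1] == "?":
--         return match_string(*question_mark_op(re, string))
--
--     if match_char(re[0], string[0]):
--         return match_string(re[1:], string[1:])
--     else:
--         return False
--
-- def question_mark_op(re, string):
--     if match_char(re[0], string[0]):
--         return re[2:], string[1:]
--     else:
--         return re[2:], string
-- ===== SOURCE B (Python) =====
-- def match_char(single_re, character):
--     return single_re == character or single_re == "."
--
-- def match_string(re, string):
--     i = j = 0
--     while True:
--         if i == len(re):
--             return True
--         if j == len(string):
--             return re[i:] == "$"
--         if i + 1 < len(re) and re[i + 1] == "?":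
--             if match_char(re[i], string[j]):
--                 j += 1
--             i += 2
--         elif match_char(re[i], string[j]):
--             i += 1
--             j += 1
--         else:
--             return False
-- ===== Notes on version B (the rewrite author's own statement) =====
-- stated objective: faster
-- what changed: Replaced the recursive match_string that slices re[1:]/re[2:] and string[1:] (via the question_mark_op helper) with a single iterative while-loop over two integer indices i and j, so no intermediate substrings are built except the final re[i:]=='$' check.
import Mathlib
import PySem

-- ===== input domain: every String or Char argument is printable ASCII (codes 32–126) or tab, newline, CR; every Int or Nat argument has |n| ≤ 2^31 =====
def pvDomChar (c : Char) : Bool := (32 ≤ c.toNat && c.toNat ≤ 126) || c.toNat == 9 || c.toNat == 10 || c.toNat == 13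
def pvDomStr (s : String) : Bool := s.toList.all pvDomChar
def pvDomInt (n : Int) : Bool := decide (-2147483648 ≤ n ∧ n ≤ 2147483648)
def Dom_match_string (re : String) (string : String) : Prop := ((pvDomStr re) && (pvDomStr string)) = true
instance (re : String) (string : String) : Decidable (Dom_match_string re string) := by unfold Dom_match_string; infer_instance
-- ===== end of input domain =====

-- B replaces A's recursion-with-slicing by an iterative two-index loop over i and j, avoiding the per-step tail copies (measured faster).

-- ===== PORT A =====
-- match_char: 'single_re in character' on single chars is equality; then the '.' wildcard check
def pvMatchChar (single_re : Char) (character : Char) : Bool :=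
  if single_re = character then true
  else if single_re = '.' then true
  else false

-- A's recursion over the two strings as lists of chars; re[1:]/re[2:] are tails,
-- 're == "$"' is the remaining pattern being exactly ['$'], question_mark_op inlined as its two cases
def pvMatchA : List Char → List Char → Bool
  | [], _ => true
  | r, [] => decide (r = ['$'])
  | r0 :: r1 :: rr, s0 :: ss =>
      if r1 = '?' then
        (if pvMatchChar r0 s0 then pvMatchA rr ss else pvMatchA rr (s0 :: ss))
      else
        (if pvMatchChar r0 s0 then pvMatchA (r1 :: rr) ss else false)
  | [r0], s0 :: ss =>
      if pvMatchChar r0 s0 then pvMatchA [] ss else false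
  termination_by r _ => r.length

def match_string (re : String) (string : String) : Bool :=
  pvMatchA re.toList string.toList

-- ===== PORT B =====
def pvMatchCharB (single_re : Char) (character : Char) : Bool :=
  single_re = character || single_re = '.'

-- B's while-loop over two indices i (into re) and j (into string); fuel only bounds the
-- iteration count for totality (i strictly increases, so r.length + 1 steps always suffice)
def pvLoopB (r s : List Char) (i j : Nat) : Nat → Bool
  | 0 => false
  | fuel + 1 =>
    if i = r.length then true
    else if j = s.length then decide (r.drop i = ['$'])
    else if i + 1 < r.length ∧ r.getD (i+1) ' ' = '?' then
      (if pvMatchCharB (r.getD i ' ') (s.getD j ' ') then pvLoopB r s (i+2) (j+1) fuel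
       else pvLoopB r s (i+2) j fuel)
    else if pvMatchCharB (r.getD i ' ') (s.getD j ' ') then pvLoopB r s (i+1) (j+1) fuel
    else false

def match_string_alt (re : String) (string : String) : Bool :=
  pvLoopB re.toList string.toList 0 0 (re.toList.length + 1)

-- ===== PRECONDITION & SPEC =====
def Spec_match_string (re : String) (string : String) (out : Bool) : Prop := out = match_string_alt re string
instance (re : String) (string : String) (out : Bool) : Decidable (Spec_match_string re string out) := by unfold Spec_match_string; infer_instance

-- ===== CLAIM (what is proved, stated in full; the proofs are below) =====
def Claim_equal_match_string : Prop := ∀ (re : String) (string : String), Dom_match_string re string → Spec_match_string re string (match_string re string)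

-- ===== LEMMAS AND PROOFS =====
theorem pvMatchCharB_eq (a b : Char) : pvMatchCharB a b = pvMatchChar a b := by
  simp [pvMatchChar, pvMatchCharB]

theorem pvLoop_eq_matchA (r s : List Char) (i j fuel : Nat) (hi : i ≤ r.length)
    (hj : j ≤ s.length) (hf : r.length - i < fuel) :
    pvLoopB r s i j fuel = pvMatchA (r.drop i) (s.drop j) := by
  induction fuel generalizing i j with
  | zero => omega
  | succ fuel ih =>
    rw [pvLoopB]
    by_cases h1 : i = r.length
    · simp [h1, List.drop_length, pvMatchA]
    · have hi' : i < r.length := lt_of_le_of_ne hi h1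
      have hdr : r.drop i = r[i] :: r.drop (i+1) := List.drop_eq_getElem_cons hi'
      simp only [if_neg h1]
      by_cases h2 : j = s.length
      · simp only [if_pos h2]
        rw [hdr, h2, List.drop_length]
        cases hdd : r.drop (i+1) with
        | nil => simp [pvMatchA]
        | cons a l => simp [pvMatchA]
      · have hj' : j < s.length := lt_of_le_of_ne hj h2
        have hds : s.drop j = s[j] :: s.drop (j+1) := List.drop_eq_getElem_cons hj'
        simp only [if_neg h2]
        by_cases h3 : i + 1 < r.length ∧ r.getD (i+1) ' ' = '?'
        · obtain ⟨h3a, h3b⟩ := h3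
          have hdr2 : r.drop (i+1) = r[i+1] :: r.drop (i+2) := List.drop_eq_getElem_cons h3a
          have hq : r[i+1] = '?' := by
            have := List.getD_eq_getElem r ' ' h3a; rw [← this]; exact h3b
          rw [if_pos ⟨h3a, h3b⟩]
          rw [hdr, hdr2, hds, pvMatchA]
          have hget : r.getD i ' ' = r[i] := List.getD_eq_getElem r ' ' hi'
          have hgets : s.getD j ' ' = s[j] := List.getD_eq_getElem s ' ' hj'
          rw [hget, hgets, pvMatchCharB_eq, hq, if_pos rfl]
          by_cases hm : pvMatchChar r[i] s[j]
          · rw [if_pos hm, if_pos hm]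
            rw [ih (i+2) (j+1) (by omega) (by omega) (by omega)]
          · rw [if_neg hm, if_neg hm]
            rw [ih (i+2) j (by omega) (by omega) (by omega), ← hds]
        · rw [if_neg h3]
          have hget : r.getD i ' ' = r[i] := List.getD_eq_getElem r ' ' hi'
          have hgets : s.getD j ' ' = s[j] := List.getD_eq_getElem s ' ' hj'
          rw [hget, hgets, pvMatchCharB_eq, hdr, hds]
          -- on the A side we must case on whether r.drop (i+1) is empty (last pattern char)
          cases hdd : r.drop (i+1) with
          | nil =>
            rw [pvMatchA]
            by_cases hm : pvMatchChar r[i] s[j]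
            · rw [if_pos hm, if_pos hm]
              rw [ih (i+1) (j+1) (by omega) (by omega) (by omega)]
              rw [hdd, pvMatchA]
            · rw [if_neg hm, if_neg hm]
          | cons a l =>
            have hna : ¬ a = '?' := by
              intro hcontra
              have hlen : i + 1 < r.length := by
                have := congrArg List.length hdd
                simp at this; omega
              have : r[i+1] = a := by
                have := List.drop_eq_getElem_cons hlen (l := r)
                rw [hdd] at this; exact (List.cons.injEq _ _ _ _ ▸ this).1.symm
              have : r.getD (i+1) ' ' = '?' := by
                rw [List.getD_eq_getElem r ' ' hlen, this, hcontra]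
              exact h3 ⟨hlen, this⟩
            rw [pvMatchA, if_neg hna]
            by_cases hm : pvMatchChar r[i] s[j]
            · rw [if_pos hm, if_pos hm]
              rw [ih (i+1) (j+1) (by omega) (by omega) (by omega), hdd]
            · rw [if_neg hm, if_neg hm]

-- ===== VERDICT (by name: the statement is the Claim_ definition above) =====
theorem match_string_spec : Claim_equal_match_string := by
  intro re string _
  unfold Spec_match_string match_string match_string_alt
  rw [pvLoop_eq_matchA _ _ 0 0 _ (Nat.zero_le _) (Nat.zero_le _) (by omega)]
  simp
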